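-- pv_equiv track=rewrite | github.com/FabioRosado/100DaysOfCode | Part I/day-24/codewars-hash_map.py | my_hash_map
-- ===== SOURCE A (Python) =====
-- def my_hash_map(list_of_strings):
--     hashed = {}
--     for word in list_of_strings:
--         key = sum(ord(c) for c in word)
--         if key in hashed:
--             hashed[key].append(word)
--         else:
--             hashed[key] = [word]
--     return hashed
-- ===== SOURCE B (Python) =====
-- def my_hash_map(list_of_strings):
--     def key_of(word):
--         return sum(map(ord, word))
--     distinct_keys = list(dict.fromkeys(map(key_of, list_of_strings)))
--     return {k: [w for w in list_of_strings if key_of(w) == k] for k in distinct_keys}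
-- ===== Notes on version B (the rewrite author's own statement) =====
-- stated objective: alternative
-- what changed: Replaces the incremental dict-building loop (append-or-insert per word) by a two-phase grouping: first dedup the list of char-code sums in first-occurrence order, then build each group with a comprehension that filters the whole input per key.
import Mathlib
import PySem

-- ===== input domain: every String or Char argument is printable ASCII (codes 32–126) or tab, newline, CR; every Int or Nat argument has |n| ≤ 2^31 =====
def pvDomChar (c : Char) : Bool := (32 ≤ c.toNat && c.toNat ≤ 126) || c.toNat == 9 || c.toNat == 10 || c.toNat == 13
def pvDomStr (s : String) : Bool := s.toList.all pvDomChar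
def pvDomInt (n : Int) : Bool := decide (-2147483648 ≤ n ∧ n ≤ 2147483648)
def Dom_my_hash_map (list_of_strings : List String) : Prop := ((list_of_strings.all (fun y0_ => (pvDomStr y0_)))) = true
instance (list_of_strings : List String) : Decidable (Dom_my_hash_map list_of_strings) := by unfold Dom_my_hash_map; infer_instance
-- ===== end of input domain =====

-- B replaces A's incremental append-or-insert dict loop by dedup-the-keys then filter-per-key; return value only.
-- ===== PORT A =====
-- key = sum(ord(c) for c in word)  (Source B's key_of(word) = sum(map(ord, word)) is the same computation, so both ports share it)
def ordSum (word : String) : Int := (word.toList.map (fun c => (c.toNat : Int))).sum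

def my_hash_map (list_of_strings : List String) : List (Int × List String) :=
  (list_of_strings.foldl
    (fun (hashed : PySem.Dict Int (List String)) word =>
      let key := ordSum word
      if hashed.contains key then hashed.modify key [] (fun l => l ++ [word])
      else hashed.insert key [word])
    PySem.Dict.empty).items

-- ===== PORT B =====
def my_hash_map_alt (list_of_strings : List String) : List (Int × List String) :=
  let distinct_keys := PySem.List.dedup (list_of_strings.map ordSum)
  distinct_keys.map (fun k => (k, list_of_strings.filter (fun w => ordSum w == k)))

-- ===== PRECONDITION & SPEC =====
def Spec_my_hash_map (list_of_strings : List String) (out : List (Int × List String)) : Prop := out = my_hash_map_alt list_of_strings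
instance (list_of_strings : List String) (out : List (Int × List String)) : Decidable (Spec_my_hash_map list_of_strings out) := by unfold Spec_my_hash_map; infer_instance

-- ===== CLAIM (what is proved, stated in full; the proofs are below) =====
def Claim_equal_my_hash_map : Prop := ∀ (list_of_strings : List String), Dom_my_hash_map list_of_strings → Spec_my_hash_map list_of_strings (my_hash_map list_of_strings)

-- ===== LEMMAS AND PROOFS =====

-- A's branch is one 'modify' in both cases
theorem my_hash_map_step (hashed : PySem.Dict Int (List String)) (word : String) :
    (if hashed.contains (ordSum word) then hashed.modify (ordSum word) [] (fun l => l ++ [word])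
     else hashed.insert (ordSum word) [word])
    = hashed.modify (ordSum word) [] (fun l => l ++ [word]) := by
  by_cases h : hashed.contains (ordSum word) = true
  · simp [h]
  · simp only [Bool.not_eq_true] at h
    rw [PySem.Dict.modify, PySem.Dict.getD_of_not_contains _ _ h]
    simp [h]

theorem my_hash_map_spec' (xs : List String) : my_hash_map xs = my_hash_map_alt xs := by
  unfold my_hash_map my_hash_map_alt
  have hloop : xs.foldl
      (fun (hashed : PySem.Dict Int (List String)) word =>
        let key := ordSum word
        if hashed.contains key then hashed.modify key [] (fun l => l ++ [word])
        else hashed.insert key [word])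
      PySem.Dict.empty
      = (xs.map (fun w => (ordSum w, w))).foldl
          (fun (d : PySem.Dict Int (List String)) p => d.modify p.1 [] (fun l => l ++ [p.2]))
          PySem.Dict.empty := by
    rw [List.foldl_map]
    exact PySem.List.foldl_congr_mem xs _ _ _ (fun acc w _ => my_hash_map_step acc w)
  rw [hloop]
  set d := (xs.map (fun w => (ordSum w, w))).foldl
      (fun (d : PySem.Dict Int (List String)) p => d.modify p.1 [] (fun l => l ++ [p.2]))
      PySem.Dict.empty with hd
  have hnd : d.keys.Nodup := by
    rw [hd, List.foldl_map]
    exact PySem.Dict.nodup_keys_foldl_modify_key xs ordSum [] _ _ PySem.Dict.nodup_keys_empty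
  have hkeys : d.keys = PySem.List.dedup (xs.map ordSum) := by
    rw [hd, List.foldl_map]
    have := PySem.Dict.keys_foldl_modify_key (l := xs) (key := ordSum)
      (d0 := ([] : List String)) (f := fun d w l => l ++ [w]) (d := PySem.Dict.empty)
    simpa [PySem.Dict.keys_empty, PySem.Set.update, PySem.Set.ofList_eq_foldl, ordSum,
      PySem.List.dedup_eq_ofList] using this
  rw [PySem.Dict.items_eq_map_keys d hnd ([] : List String), hkeys]
  refine List.map_congr_left (fun k hk => ?_)
  have hget : d.getD k [] = xs.filter (fun w => ordSum w == k) := by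
    rw [hd, PySem.Dict.getD_foldl_modify_append, PySem.Dict.getD_empty, List.filter_map,
      List.map_map]
    simp only [Function.comp_def]
    simp [ordSum]
  rw [hget]

-- ===== VERDICT (by name: the statement is the Claim_ definition above) =====
theorem my_hash_map_spec : Claim_equal_my_hash_map := by
  intro xs _
  exact my_hash_map_spec' xs
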